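-- pv_equiv track=rewrite | github.com/Rusih100/symmetric-ciphers | src/text_search/search.py | search_word_by_pattern
-- ===== SOURCE A (Python) =====
-- def check_word_by_pattern(word: str, pattern: str) -> bool:
--     if len(pattern) != len(word):
--         return False
--     if len(set(pattern)) != len(set(word)):
--         return False
--
--     replace_map: dict[str, str] = dict(
--         zip(word, pattern)
--     )
--     check_word = ""
--     for char in word:
--         check_word += replace_map[char]
--
--     return check_word == pattern
--
-- def get_update_decrypt_alphabet(
--     word: str, pattern: str, alphabet: dict[str, str]
-- ) -> dict[str, str]:
--
--     updated_alphabet: dict[str, str] = {}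
--     for i, char in enumerate(word):
--         if char not in alphabet:
--             updated_alphabet[char] = pattern[i]
--         elif alphabet[char] != pattern[i]:
--             return {}
--
--     if set(alphabet.values()) & set(updated_alphabet.values()):
--         return {}
--     return updated_alphabet
--
-- def search_word_by_pattern(
--     pattern: str, text: str, alphabet: dict[str, str]
-- ) -> tuple[str | None, dict[str, str]]:
--     pattern_length = len(pattern)
--     text_length = len(text)
--
--     for i in range(text_length - pattern_length + 1):
--         word = text[i : i + pattern_length]
--
--         if not check_word_by_pattern(word, pattern):
--             continue
--
--         updated_alphabet = get_update_decrypt_alphabet(word, pattern, alphabet)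
--         if not updated_alphabet:
--             continue
--
--         return word, updated_alphabet
--
--     return None, {}
-- ===== SOURCE B (Python) =====
-- def get_update_decrypt_alphabet(
--     word: str, pattern: str, alphabet: dict[str, str]
-- ) -> dict[str, str]:
--
--     updated_alphabet: dict[str, str] = {}
--     for i, char in enumerate(word):
--         if char not in alphabet:
--             updated_alphabet[char] = pattern[i]
--         elif alphabet[char] != pattern[i]:
--             return {}
--
--     if set(alphabet.values()) & set(updated_alphabet.values()):
--         return {}
--     return updated_alphabet
--
--
-- def search_word_by_pattern(
--     pattern: str, text: str, alphabet: dict[str, str]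
-- ) -> tuple[str | None, dict[str, str]]:
--     pattern_length = len(pattern)
--     # canonical first-occurrence signature of the pattern, computed once
--     signature = [pattern.index(c) for c in pattern]
--
--     for i in range(len(text) - pattern_length + 1):
--         word = text[i : i + pattern_length]
--         if [word.index(c) for c in word] != signature:
--             continue
--
--         updated_alphabet = get_update_decrypt_alphabet(word, pattern, alphabet)
--         if updated_alphabet:
--             return word, updated_alphabet
--
--     return None, {}
-- ===== Notes on version B (the rewrite author's own statement) =====
-- stated objective: idiomatic
-- what changed: The per-window isomorphism test (length + distinct-count + replace-map string reconstruction) is replaced by comparing canonical first-occurrence signatures, with the pattern's signature precomputed once before the sliding loop; the alphabet-merge step is kept as is.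
import Mathlib
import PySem

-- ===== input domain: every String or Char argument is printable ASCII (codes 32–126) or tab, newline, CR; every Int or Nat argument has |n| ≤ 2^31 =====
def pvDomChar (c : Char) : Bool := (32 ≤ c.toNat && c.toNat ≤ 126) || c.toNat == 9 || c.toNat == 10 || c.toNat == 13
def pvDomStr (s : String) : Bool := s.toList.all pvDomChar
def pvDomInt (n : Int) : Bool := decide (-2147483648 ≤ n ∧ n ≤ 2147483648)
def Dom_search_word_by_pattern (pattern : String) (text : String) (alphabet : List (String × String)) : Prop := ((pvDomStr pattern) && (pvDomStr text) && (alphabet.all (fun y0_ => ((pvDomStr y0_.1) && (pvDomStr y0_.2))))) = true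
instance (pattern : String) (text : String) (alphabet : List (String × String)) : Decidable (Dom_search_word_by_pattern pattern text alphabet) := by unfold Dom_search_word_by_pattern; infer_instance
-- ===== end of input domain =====

-- B replaces the per-window isomorphism test (length + distinct-count + replace-map reconstruction) by
-- comparing canonical first-occurrence signatures, precomputing the pattern's signature once (idiomatic).


-- ===== PORT A =====

def check_word_by_pattern (word : String) (pattern : String) : Bool :=
  if pattern.toList.length ≠ word.toList.length then false
  else if (PySem.Set.ofList pattern.toList).length ≠ (PySem.Set.ofList word.toList).length then false
  else
    let replace_map : PySem.Dict Char Char :=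
      (word.toList.zip pattern.toList).foldl (fun d kv => d.insert kv.1 kv.2) PySem.Dict.empty
    -- replace_map[char]: the lengths are equal here, so every char of word is a key and the default is never used
    let check_word : List Char :=
      word.toList.foldl (fun acc c => acc ++ [replace_map.getD c c]) []
    check_word == pattern.toList

-- the 'for i, char in enumerate(word)' loop of get_update_decrypt_alphabet, with its two early 'return {}' exits as none
def gua_loop (pattern : List Char) (alphabet : PySem.Dict String String) :
    List (Int × Char) → PySem.Dict String String → Option (PySem.Dict String String)
  | [], upd => some upd
  | (i, ch) :: rest, upd =>
    let c : String := String.ofList [ch]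
    -- pattern[i]: whenever this runs, 0 <= i < len(word) = len(pattern), so the default is never used
    let pi : String := String.ofList [PySem.List.pyGetD pattern i ch]
    if !(alphabet.contains c) then gua_loop pattern alphabet rest (upd.insert c pi)
    else if (alphabet.get? c).getD "" ≠ pi then none
    else gua_loop pattern alphabet rest upd

def get_update_decrypt_alphabet (word : String) (pattern : String) (alphabet : PySem.Dict String String) :
    PySem.Dict String String :=
  match gua_loop pattern.toList alphabet (PySem.List.enumerate word.toList) PySem.Dict.empty with
  | none => PySem.Dict.empty
  | some updated =>
    if PySem.Set.inter (PySem.Set.ofList alphabet.values) (PySem.Set.ofList updated.values) ≠ [] then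
      PySem.Dict.empty
    else updated

def swp_loop (pattern : String) (text : String) (alphabet : PySem.Dict String String) :
    List Int → Option String × (List (String × String))
  | [] => (none, [])
  | i :: rest =>
    let word : String :=
      String.ofList (PySem.List.slice text.toList (some i) (some (i + (pattern.toList.length : Int))))
    if !(check_word_by_pattern word pattern) then swp_loop pattern text alphabet rest
    else
      let updated := get_update_decrypt_alphabet word pattern alphabet
      if updated.items = [] then swp_loop pattern text alphabet rest
      else (some word, updated.items)

def search_word_by_pattern (pattern : String) (text : String) (alphabet : List (String × String)) :
    Option String × (List (String × String)) :=
  swp_loop pattern text (PySem.Dict.ofList alphabet)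
    (PySem.List.pyRange 0 ((text.toList.length : Int) - (pattern.toList.length : Int) + 1) 1)

-- ===== PORT B =====

-- word.index(c) for a char c of word itself is exactly List.idxOf (c always occurs, so no ValueError)
def swp_alt_loop (pattern : String) (text : String) (alphabet : PySem.Dict String String)
    (m : Int) (signature : List Nat) : List Int → Option String × (List (String × String))
  | [] => (none, [])
  | i :: rest =>
    let word : String := String.ofList (PySem.List.slice text.toList (some i) (some (i + m)))
    if word.toList.map (fun c => word.toList.idxOf c) ≠ signature then
      swp_alt_loop pattern text alphabet m signature rest
    else
      let updated := get_update_decrypt_alphabet word pattern alphabet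
      if updated.items ≠ [] then (some word, updated.items)
      else swp_alt_loop pattern text alphabet m signature rest

def search_word_by_pattern_alt (pattern : String) (text : String) (alphabet : List (String × String)) :
    Option String × (List (String × String)) :=
  let m : Int := (pattern.toList.length : Int)
  let signature : List Nat := pattern.toList.map (fun c => pattern.toList.idxOf c)
  swp_alt_loop pattern text (PySem.Dict.ofList alphabet) m signature
    (PySem.List.pyRange 0 ((text.toList.length : Int) - m + 1) 1)

-- ===== PRECONDITION & SPEC =====
def Spec_search_word_by_pattern (pattern : String) (text : String) (alphabet : List (String × String)) (out : Option String × (List (String × String))) : Prop := out = search_word_by_pattern_alt pattern text alphabet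
instance (pattern : String) (text : String) (alphabet : List (String × String)) (out : Option String × (List (String × String))) : Decidable (Spec_search_word_by_pattern pattern text alphabet out) := by unfold Spec_search_word_by_pattern; infer_instance

-- ===== CLAIM (what is proved, stated in full; the proofs are below) =====
def Claim_equal_search_word_by_pattern : Prop := ∀ (pattern : String) (text : String) (alphabet : List (String × String)), Dom_search_word_by_pattern pattern text alphabet → Spec_search_word_by_pattern pattern text alphabet (search_word_by_pattern pattern text alphabet)

-- ===== LEMMAS AND PROOFS =====

-- the replace-map dict built by A from zip(word, pattern)
def zipd (w p : List Char) : PySem.Dict Char Char :=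
  (w.zip p).foldl (fun d kv => d.insert kv.1 kv.2) PySem.Dict.empty

-- canonical first-occurrence signature used by B
def canon (w : List Char) : List Nat := w.map (fun c => w.idxOf c)

-- "same-position chars in w force same-position chars in p"
def PosImp (w p : List Char) : Prop :=
  ∀ i j (_ : i < w.length) (_ : j < w.length) (_ : i < p.length) (_ : j < p.length),
    w[i] = w[j] → p[i] = p[j]

lemma beq_list (x y : List Char) : (x == y) = decide (x = y) := by
  by_cases h : x = y <;> simp [h]

lemma get?_foldl_ins (l : List (Char × Char)) (d : PySem.Dict Char Char) (c : Char) :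
    (l.foldl (fun d kv => d.insert kv.1 kv.2) d).get? c
      = ((l.reverse.find? (fun kv => kv.1 == c)).map Prod.snd).or (d.get? c) := by
  induction l generalizing d with
  | nil => simp
  | cons a t ih =>
    rw [List.foldl_cons, ih, List.reverse_cons, List.find?_append]
    cases h : t.reverse.find? (fun kv => kv.1 == c) with
    | some kv => simp
    | none =>
      by_cases hac : a.1 = c
      · subst hac
        simp
      · simp [PySem.Dict.get?_insert, hac, Ne.symm hac]

lemma get?_zipd_mem (w p : List Char) (hlen : p.length = w.length) (c : Char) (hc : c ∈ w) :
    ∃ j, ∃ (hj : j < w.length) (hj' : j < p.length), w[j] = c ∧ (zipd w p).get? c = some p[j] := by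

  obtain ⟨j0, hj0, hw0⟩ := List.mem_iff_getElem.mp hc
  have hzl : (w.zip p).length = w.length := by rw [List.length_zip]; omega
  have hmemz : (w[j0], p[j0]'(by omega)) ∈ w.zip p := by
    have hjz : j0 < (w.zip p).length := by omega
    have := List.getElem_zip (l := w) (l' := p) (i := j0) (h := hjz)
    rw [← this]; exact List.getElem_mem hjz
  have hsome : ((w.zip p).reverse.find? (fun kv => kv.1 == c)).isSome := by
    apply List.find?_isSome.mpr
    exact ⟨_, List.mem_reverse.mpr hmemz, by simp [hw0]⟩
  obtain ⟨kv, hkv⟩ := Option.isSome_iff_exists.mp hsome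
  have hkvz : kv ∈ w.zip p := List.mem_reverse.mp (List.mem_of_find?_eq_some hkv)
  obtain ⟨j, hj, hje⟩ := List.mem_iff_getElem.mp hkvz
  have hje' : kv = (w[j]'(by omega), p[j]'(by omega)) := by
    rw [← hje]; exact List.getElem_zip (h := hj)
  have hpred : kv.1 = c := by simpa using List.find?_some hkv
  have hwj : w[j]'(by omega) = c := by rw [← hpred, hje']
  refine ⟨j, by omega, by omega, hwj, ?_⟩
  rw [zipd, get?_foldl_ins, hkv, hje']
  simp [PySem.Dict.get?_empty]

lemma g_pointwise (w p : List Char) (hlen : p.length = w.length) (hcons : PosImp w p)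
    (i : Nat) (hi : i < w.length) (hi' : i < p.length) :
    (zipd w p).getD w[i] w[i] = p[i] := by
  obtain ⟨j, hj, hj', hwj, hget⟩ := get?_zipd_mem w p hlen (w[i]'hi) (List.getElem_mem hi)
  rw [PySem.Dict.getD_eq_get?_getD, hget]
  simp [hcons j i hj hi hj' hi' hwj]

lemma recon_iff (w p : List Char) (hlen : p.length = w.length) :
    (w.map (fun c => (zipd w p).getD c c) = p) ↔ PosImp w p := by
  constructor
  · intro h i j hi hj hi' hj' hww
    have hp : ∀ k (hk : k < w.length) (hk' : k < p.length),
        p[k] = (zipd w p).getD (w[k]'hk) (w[k]'hk) := by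
      intro k hk hk'
      have h1 : (w.map (fun c => (zipd w p).getD c c))[k]'(by simpa using hk) = p[k]'hk' :=
        List.getElem_of_eq h _
      rw [← h1, List.getElem_map]
    rw [hp i hi hi', hp j hj hj', hww]
  · intro hcons
    apply List.ext_getElem (by simp [hlen])
    intro k h1 h2
    simp only [List.getElem_map]
    exact g_pointwise w p hlen hcons k (by simpa using h1) h2

lemma card_ofList (l : List Char) : (PySem.Set.ofList l).length = l.toFinset.card := by
  have h1 : (PySem.Set.ofList l).toFinset = l.toFinset := by
    ext x; simp [List.mem_toFinset, PySem.Set.mem_ofList]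
  calc (PySem.Set.ofList l).length
      = (PySem.Set.ofList l).toFinset.card :=
        (List.toFinset_card_of_nodup (PySem.Set.nodup_ofList l)).symm
    _ = l.toFinset.card := by rw [h1]

lemma img (w p : List Char) (hlen : p.length = w.length) (hcons : PosImp w p) :
    p.toFinset = w.toFinset.image (fun c => (zipd w p).getD c c) := by
  ext x
  simp only [Finset.mem_image, List.mem_toFinset]
  constructor
  · intro hx
    obtain ⟨i, hi', hpi⟩ := List.mem_iff_getElem.mp hx
    refine ⟨w[i]'(by omega), List.getElem_mem (by omega), ?_⟩
    rw [g_pointwise w p hlen hcons i (by omega) hi']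
    exact hpi
  · rintro ⟨c, hcw, rfl⟩
    obtain ⟨j, hj, hj', hwj, hget⟩ := get?_zipd_mem w p hlen c hcw
    rw [PySem.Dict.getD_eq_get?_getD, hget]
    simp [List.getElem_mem hj']

lemma inj_of_card (w p : List Char) (hlen : p.length = w.length) (hcons : PosImp w p)
    (hcard : w.toFinset.card = p.toFinset.card) : PosImp p w := by
  have himg := img w p hlen hcons
  have hinj : Set.InjOn (fun c => (zipd w p).getD c c) ↑w.toFinset := by
    apply Finset.card_image_iff.mp
    rw [← himg]
    exact hcard.symm
  intro i j hi hj hi' hj' hpp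
  have e1 : (zipd w p).getD (w[i]'hi') (w[i]'hi') = p[i]'hi := g_pointwise w p hlen hcons i hi' hi
  have e2 : (zipd w p).getD (w[j]'hj') (w[j]'hj') = p[j]'hj := g_pointwise w p hlen hcons j hj' hj
  exact hinj (by simp [List.getElem_mem]) (by simp [List.getElem_mem])
    (by simp only []; rw [e1, e2]; exact hpp)

lemma idxOf_min (l : List Char) (c : Char) (i : Nat) (hi : i < l.length) (h : l[i] = c) :
    l.idxOf c ≤ i := by
  induction l generalizing i with
  | nil => simp at hi
  | cons a t ih =>
    cases i with
    | zero =>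
      have : a = c := by simpa using h
      simp [this]
    | succ n =>
      by_cases hac : a = c
      · simp [hac]
      · have ht : t[n]'(by simpa using hi) = c := by simpa using h
        have := ih n (by simpa using hi) ht
        simp [hac]
        omega

lemma canon_eq_of (w p : List Char) (hlen : p.length = w.length)
    (h1 : PosImp w p) (h2 : PosImp p w) : canon w = canon p := by

  apply List.ext_getElem (by simp [canon, hlen])
  intro k hk1 hk2
  have hkw : k < w.length := by simpa [canon] using hk1
  have hkp : k < p.length := by simpa [canon] using hk2
  simp only [canon, List.getElem_map]
  apply le_antisymm
  · have hb : p.idxOf (p[k]'hkp) < p.length :=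
      List.idxOf_lt_length_of_mem (List.getElem_mem hkp)
    have hpe : p[p.idxOf (p[k]'hkp)]'hb = p[k]'hkp := List.getElem_idxOf hb
    have hwe : w[p.idxOf (p[k]'hkp)]'(by omega) = w[k]'hkw :=
      h2 _ k hb hkp (by omega) hkw hpe
    exact idxOf_min w _ _ (by omega) hwe
  · have hb : w.idxOf (w[k]'hkw) < w.length :=
      List.idxOf_lt_length_of_mem (List.getElem_mem hkw)
    have hwe : w[w.idxOf (w[k]'hkw)]'hb = w[k]'hkw := List.getElem_idxOf hb
    have hpe : p[w.idxOf (w[k]'hkw)]'(by omega) = p[k]'hkp :=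
      h1 _ k hb hkw (by omega) hkp hwe
    exact idxOf_min p _ _ (by omega) hpe

lemma len_of_canon (w p : List Char) (h : canon w = canon p) : p.length = w.length := by
  have := congrArg List.length h
  simpa [canon] using this.symm
lemma posimp_of_canon (w p : List Char) (h : canon w = canon p) : PosImp w p := by
  have hlen := len_of_canon w p h
  intro i j hi hj hi' hj' hww
  have hci : w.idxOf (w[i]'hi) = p.idxOf (p[i]'hi') := by
    have h1 : (canon w)[i]'(by simp [canon]; omega) = (canon p)[i]'(by simp [canon]; omega) :=
      List.getElem_of_eq h _
    simpa [canon, List.getElem_map] using h1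
  have hcj : w.idxOf (w[j]'hj) = p.idxOf (p[j]'hj') := by
    have h1 : (canon w)[j]'(by simp [canon]; omega) = (canon p)[j]'(by simp [canon]; omega) :=
      List.getElem_of_eq h _
    simpa [canon, List.getElem_map] using h1
  have hidx : p.idxOf (p[i]'hi') = p.idxOf (p[j]'hj') := by
    rw [← hci, ← hcj, hww]
  have ha : p.idxOf (p[i]'hi') < p.length :=
    List.idxOf_lt_length_of_mem (List.getElem_mem hi')
  have hb : p.idxOf (p[j]'hj') < p.length :=
    List.idxOf_lt_length_of_mem (List.getElem_mem hj')
  have e1 : p[p.idxOf (p[i]'hi')]'ha = p[i]'hi' := List.getElem_idxOf ha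
  have e2 : p[p.idxOf (p[j]'hj')]'hb = p[j]'hj' := List.getElem_idxOf hb
  rw [← e1, ← e2]
  congr 1


lemma cards_of_canon (w p : List Char) (h : canon w = canon p) :
    w.toFinset.card = p.toFinset.card := by
  have h1 : PosImp w p := posimp_of_canon w p h
  have h2 : PosImp p w := posimp_of_canon p w h.symm
  have hlen := len_of_canon w p h
  apply le_antisymm
  · rw [img p w (by omega) h2]
    exact Finset.card_image_le
  · rw [img w p hlen h1]
    exact Finset.card_image_le

lemma crux (word pattern : String) :
    check_word_by_pattern word pattern = decide (canon word.toList = canon pattern.toList) := by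

  unfold check_word_by_pattern
  set w := word.toList with hwdef
  set p := pattern.toList with hpdef
  by_cases hlen : p.length = w.length
  · rw [if_neg (not_not_intro hlen)]
    by_cases hcard : (PySem.Set.ofList p).length = (PySem.Set.ofList w).length
    · rw [if_neg (not_not_intro hcard)]
      have hz : (w.zip p).foldl (fun d kv => d.insert kv.1 kv.2) PySem.Dict.empty = zipd w p := rfl
      simp only [PySem.List.foldl_append_singleton_eq_map, List.nil_append, beq_list,
        decide_eq_decide]
      rw [hz]
      constructor
      · intro hr
        have h1 : PosImp w p := (recon_iff w p hlen).mp hr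
        have h2 : PosImp p w := inj_of_card w p hlen h1
          (by rw [← card_ofList, ← card_ofList, hcard])
        exact canon_eq_of w p hlen h1 h2
      · intro hcanon
        exact (recon_iff w p hlen).mpr (posimp_of_canon w p hcanon)
    · rw [if_pos hcard]
      symm
      simp only [decide_eq_false_iff_not]
      intro hcanon
      exact hcard (by rw [card_ofList, card_ofList, cards_of_canon w p hcanon])
  · rw [if_pos hlen]
    symm
    simp only [decide_eq_false_iff_not]
    intro hcanon
    exact hlen (len_of_canon w p hcanon)

lemma loops_eq (pattern text : String) (alph : PySem.Dict String String) (l : List Int) :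
    swp_loop pattern text alph l
      = swp_alt_loop pattern text alph (pattern.toList.length : Int) (canon pattern.toList) l := by

  induction l with
  | nil => simp [swp_loop, swp_alt_loop]
  | cons i t ih =>
    simp only [swp_loop, swp_alt_loop]
    rw [crux]
    by_cases hc :
        canon (String.ofList (PySem.List.slice text.toList (some i)
          (some (i + (pattern.toList.length : Int))))).toList = canon pattern.toList
    · have hcB : (String.ofList (PySem.List.slice text.toList (some i)
          (some (i + (pattern.toList.length : Int))))).toList.map
            (fun c => (String.ofList (PySem.List.slice text.toList (some i)
              (some (i + (pattern.toList.length : Int))))).toList.idxOf c)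
          = canon pattern.toList := hc
      have hd := decide_eq_true hc
      rw [if_neg (by rw [hd]; simp), if_neg (not_not_intro hcB)]
      by_cases hupd : (get_update_decrypt_alphabet
          (String.ofList (PySem.List.slice text.toList (some i)
            (some (i + (pattern.toList.length : Int))))) pattern alph).items = []
      · rw [if_pos hupd, if_neg (not_not_intro hupd)]
        exact ih
      · rw [if_neg hupd, if_pos hupd]
    · have hcB : ¬ ((String.ofList (PySem.List.slice text.toList (some i)
          (some (i + (pattern.toList.length : Int))))).toList.map
            (fun c => (String.ofList (PySem.List.slice text.toList (some i)
              (some (i + (pattern.toList.length : Int))))).toList.idxOf c)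
          = canon pattern.toList) := hc
      have hd := decide_eq_false hc
      rw [if_pos (by rw [hd]; simp), if_pos hcB]
      exact ih

-- ===== VERDICT (by name: the statement is the Claim_ definition above) =====
theorem search_word_by_pattern_spec : Claim_equal_search_word_by_pattern := by
  intro pattern text alphabet _
  unfold Spec_search_word_by_pattern search_word_by_pattern search_word_by_pattern_alt
  exact loops_eq pattern text (PySem.Dict.ofList alphabet) _
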